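-- pv_equiv track=rewrite | github.com/Raumfahrer007/AoC2023 | day01.py | return_first_string_number
-- ===== SOURCE A (Python) =====
-- def return_first_string_number(input, numbers):
--     min_index = len(input)
--     first_number = ""
--     for i, number in enumerate(numbers):
--         index = input.find(number)
--         if not index == -1:
--             if index < min_index:
--                 min_index = index
--                 first_number = str(i)
--     return first_number
-- ===== SOURCE B (Python) =====
-- def return_first_string_number(input, numbers):
--     # Single left-to-right positional sweep: at each position try the words in
--     # list order; the first hit is the earliest-index / lowest-i winner.
--     for pos in range(len(input)):
--         for i, number in enumerate(numbers):
--             if input.startswith(number, pos):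
--                 return str(i)
--     return ""
-- ===== Notes on version B (the rewrite author's own statement) =====
-- stated objective: faster
-- what changed: A runs a full find() scan of the input for every word and keeps the strict-minimum index with its word position; B does a single left-to-right positional sweep, trying the words in list order at each position and returning at the first hit.
import Mathlib
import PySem

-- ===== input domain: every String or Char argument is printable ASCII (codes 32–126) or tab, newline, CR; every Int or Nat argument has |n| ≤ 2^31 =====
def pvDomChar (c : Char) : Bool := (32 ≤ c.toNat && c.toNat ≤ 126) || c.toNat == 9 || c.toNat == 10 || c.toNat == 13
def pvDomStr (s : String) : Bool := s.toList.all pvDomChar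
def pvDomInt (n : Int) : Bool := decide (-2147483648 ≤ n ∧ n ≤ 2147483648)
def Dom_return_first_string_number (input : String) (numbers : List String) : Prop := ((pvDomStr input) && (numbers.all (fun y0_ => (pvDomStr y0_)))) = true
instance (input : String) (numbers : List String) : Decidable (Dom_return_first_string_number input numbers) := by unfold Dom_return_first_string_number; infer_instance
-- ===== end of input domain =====

-- B replaces A's per-word `find` scans by one left-to-right positional sweep that
-- returns at the first (position, word-index) hit; same result (alternative decomposition).

-- ===== PORT A =====
def return_first_string_number (input : String) (numbers : List String) : String :=
  ((PySem.List.enumerate numbers 0).foldl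
    (fun (st : Int × String) (p : Int × String) =>
      let index := PySem.Str.find input p.2
      if ¬ index = -1 then
        if index < st.1 then (index, PySem.Int.toStr p.1) else st
      else st)
    (PySem.Str.len input, "")).2

-- ===== PORT B =====
-- `input.startswith(number, pos)` for 0 ≤ pos ≤ len(input) is exactly
-- `startswith (input[pos:]) number`; B only uses pos in range(len(input)).
def rfsnFirstMatch (suffix : List Char) (numbers : List (List Char)) (i : Int) : Option String :=
  match numbers with
  | [] => none
  | n :: rest =>
    if PySem.Chars.startswith suffix n then some (PySem.Int.toStr i)
    else rfsnFirstMatch suffix rest (i + 1)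

def rfsnScan (numbers : List (List Char)) : List Char → String
  | [] => ""
  | c :: rest =>
    match rfsnFirstMatch (c :: rest) numbers 0 with
    | some s => s
    | none => rfsnScan numbers rest

def return_first_string_number_alt (input : String) (numbers : List String) : String :=
  rfsnScan (numbers.map String.toList) input.toList

-- ===== PRECONDITION & SPEC =====
def Spec_return_first_string_number (input : String) (numbers : List String) (out : String) : Prop := out = return_first_string_number_alt input numbers
instance (input : String) (numbers : List String) (out : String) : Decidable (Spec_return_first_string_number input numbers out) := by unfold Spec_return_first_string_number; infer_instance

-- ===== CLAIM (what is proved, stated in full; the proofs are below) =====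
def Claim_equal_return_first_string_number : Prop := ∀ (input : String) (numbers : List String), Dom_return_first_string_number input numbers → Spec_return_first_string_number input numbers (return_first_string_number input numbers)

-- ===== LEMMAS AND PROOFS =====

-- `F cs w` = index of the first occurrence of w in cs (-1 if absent), as A computes it.
def rfsnF (cs : List Char) (w : String) : Int := PySem.Chars.find cs w.toList

-- The (first-occurrence position, word index) pair A's fold ends up keeping,
-- among words whose first occurrence is ≠ -1 and < m; cons-structured for induction.
def rfsnBest (cs : List Char) : List String → Int → Option (Int × Nat)
  | [], _ => none
  | w :: r, m =>
    if rfsnF cs w ≠ -1 ∧ rfsnF cs w < m then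
      match rfsnBest cs r (rfsnF cs w) with
      | some (p, j) => some (p, j + 1)
      | none => some (rfsnF cs w, 0)
    else
      match rfsnBest cs r m with
      | some (p, j) => some (p, j + 1)
      | none => none

lemma rfsnBest_none_iff (cs : List Char) (l : List String) (m : Int) :
    rfsnBest cs l m = none ↔ ∀ w ∈ l, ¬ (rfsnF cs w ≠ -1 ∧ rfsnF cs w < m) := by
  induction l generalizing m with
  | nil => simp [rfsnBest]
  | cons w r ih =>
    by_cases hq : rfsnF cs w ≠ -1 ∧ rfsnF cs w < m
    · simp only [rfsnBest, if_pos hq]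
      constructor
      · intro h; cases hb : rfsnBest cs r (rfsnF cs w) with
        | some pj => rw [hb] at h; cases pj; simp at h
        | none => rw [hb] at h; simp at h
      · intro h; exact absurd hq (h w (by simp))
    · simp only [rfsnBest, if_neg hq]
      cases hb : rfsnBest cs r m with
      | some pj =>
        cases pj; simp only []
        constructor
        · intro h; simp at h
        · intro h
          have := (ih m).mpr (fun v hv => h v (by simp [hv]))
          rw [hb] at this; simp at this
      | none =>
        constructor
        · intro _ v hv
          rcases List.mem_cons.mp hv with rfl | hv'
          · exact hq
          · exact (ih m).mp hb v hv'
        · intro _; rfl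

lemma rfsnBest_some_spec (cs : List Char) (l : List String) (m p : Int) (j : Nat) :
    rfsnBest cs l m = some (p, j) →
    ∃ hj : j < l.length,
      rfsnF cs l[j] = p ∧ p ≠ -1 ∧ p < m ∧
      ∀ k (hk : k < l.length), (rfsnF cs l[k] ≠ -1 ∧ rfsnF cs l[k] < m) →
        p ≤ rfsnF cs l[k] ∧ (rfsnF cs l[k] = p → j ≤ k) := by
  induction l generalizing m p j with
  | nil => intro h; simp [rfsnBest] at h
  | cons w r ih =>
    intro h
    by_cases hq : rfsnF cs w ≠ -1 ∧ rfsnF cs w < m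
    · rw [rfsnBest, if_pos hq] at h
      cases hb : rfsnBest cs r (rfsnF cs w) with
      | some pj =>
        obtain ⟨p', j'⟩ := pj
        rw [hb] at h
        simp only [Option.some.injEq, Prod.mk.injEq] at h
        obtain ⟨rfl, rfl⟩ := h
        obtain ⟨hj', hF, hne, hlt, hmin⟩ := ih (rfsnF cs w) p' j' hb
        refine ⟨by simpa using Nat.succ_lt_succ hj', by simpa using hF, hne, lt_trans hlt hq.2, ?_⟩
        intro k hk hkq
        cases k with
        | zero =>
          simp only [List.getElem_cons_zero] at hkq ⊢
          exact ⟨le_of_lt hlt, fun he => absurd he (by omega)⟩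
        | succ k' =>
          have hk2 : k' < r.length := by simp at hk; omega
          simp only [List.getElem_cons_succ] at hkq ⊢
          by_cases hlt2 : rfsnF cs r[k'] < rfsnF cs w
          · have := hmin k' hk2 ⟨hkq.1, hlt2⟩
            exact ⟨this.1, fun he => Nat.succ_le_succ (this.2 he)⟩
          · exact ⟨le_trans (le_of_lt hlt) (not_lt.mp hlt2), fun he => absurd he (by omega)⟩
      | none =>
        rw [hb] at h
        simp only [Option.some.injEq, Prod.mk.injEq] at h
        obtain ⟨rfl, rfl⟩ := h
        have hnone := (rfsnBest_none_iff cs r (rfsnF cs w)).mp hb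
        refine ⟨by simp, by simp, hq.1, hq.2, ?_⟩
        intro k hk hkq
        cases k with
        | zero => simp
        | succ k' =>
          have hk2 : k' < r.length := by simp at hk; omega
          simp only [List.getElem_cons_succ] at hkq ⊢
          have hk' : r[k'] ∈ r := List.getElem_mem _
          have := hnone r[k'] hk'
          constructor
          · by_contra hc
            exact this ⟨hkq.1, by omega⟩
          · intro _; omega
    · rw [rfsnBest, if_neg hq] at h
      cases hb : rfsnBest cs r m with
      | some pj =>
        obtain ⟨p', j'⟩ := pj
        rw [hb] at h
        simp only [Option.some.injEq, Prod.mk.injEq] at h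
        obtain ⟨rfl, rfl⟩ := h
        obtain ⟨hj', hF, hne, hlt, hmin⟩ := ih m p' j' hb
        refine ⟨by simpa using Nat.succ_lt_succ hj', by simpa using hF, hne, hlt, ?_⟩
        intro k hk hkq
        cases k with
        | zero => simp only [List.getElem_cons_zero] at hkq; exact absurd hkq hq
        | succ k' =>
          have hk2 : k' < r.length := by simp at hk; omega
          simp only [List.getElem_cons_succ] at hkq ⊢
          have := hmin k' hk2 hkq
          exact ⟨this.1, fun he => Nat.succ_le_succ (this.2 he)⟩
      | none => rw [hb] at h; exact absurd h (by simp)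

-- A's fold, characterised by rfsnBest.
lemma rfsnFoldA_eq (input : String) (l : List String) :
    ∀ (i0 m : Int) (name : String),
    ((PySem.List.enumerate l i0).foldl
      (fun (st : Int × String) (p : Int × String) =>
        let index := PySem.Str.find input p.2
        if ¬ index = -1 then
          if index < st.1 then (index, PySem.Int.toStr p.1) else st
        else st)
      (m, name)).2
    = match rfsnBest input.toList l m with
      | some (_, j) => PySem.Int.toStr (i0 + (j : Int))
      | none => name := by
  induction l with
  | nil => intro i0 m name; simp [PySem.List.enumerate_nil, rfsnBest]
  | cons w r ih =>
    intro i0 m name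
    rw [PySem.List.enumerate_cons, List.foldl_cons]
    have hfw : PySem.Str.find input w = rfsnF input.toList w := by
      simp [rfsnF, PySem.Str.find_eq]
    by_cases h1 : rfsnF input.toList w = -1
    · simp only [hfw, h1, not_true_eq_false, if_false]
      rw [ih (i0 + 1) m name]
      rw [rfsnBest, if_neg (by simp [h1])]
      cases hb : rfsnBest input.toList r m with
      | some pj =>
        obtain ⟨p', j'⟩ := pj
        simp only [Nat.cast_add, Nat.cast_one]
        congr 1; omega
      | none => rfl
    · simp only [hfw, h1, not_false_eq_true, if_true]
      by_cases h2 : rfsnF input.toList w < m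
      · rw [if_pos h2]
        rw [ih (i0 + 1) (rfsnF input.toList w) (PySem.Int.toStr i0)]
        rw [rfsnBest, if_pos ⟨h1, h2⟩]
        cases hb : rfsnBest input.toList r (rfsnF input.toList w) with
        | some pj =>
          obtain ⟨p', j'⟩ := pj
          simp only [Nat.cast_add, Nat.cast_one]
          congr 1; omega
        | none => simp
      · rw [if_neg h2]
        rw [ih (i0 + 1) m name]
        rw [rfsnBest, if_neg (by intro hc; exact h2 hc.2)]
        cases hb : rfsnBest input.toList r m with
        | some pj =>
          obtain ⟨p', j'⟩ := pj
          simp only [Nat.cast_add, Nat.cast_one]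
          congr 1; omega
        | none => rfl

-- B's inner loop.
lemma rfsnFirstMatch_none (suffix : List Char) (ns : List (List Char)) :
    (∀ w ∈ ns, PySem.Chars.startswith suffix w = false) →
    ∀ i, rfsnFirstMatch suffix ns i = none := by
  induction ns with
  | nil => intro _ i; rfl
  | cons n rest ih =>
    intro h i
    rw [rfsnFirstMatch]
    rw [if_neg (by simp [h n (by simp)])]
    exact ih (fun w hw => h w (by simp [hw])) (i + 1)

lemma rfsnFirstMatch_some (suffix : List Char) (ns : List (List Char)) (j : Nat) :
    ∀ i (hj : j < ns.length),
    PySem.Chars.startswith suffix ns[j] = true →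
    (∀ k (hk : k < j), PySem.Chars.startswith suffix (ns[k]'(by omega)) = false) →
    rfsnFirstMatch suffix ns i = some (PySem.Int.toStr (i + (j : Int))) := by
  induction ns generalizing j with
  | nil => intro i hj; simp at hj
  | cons n rest ih =>
    intro i hj hmatch hbefore
    cases j with
    | zero =>
      rw [rfsnFirstMatch, if_pos (by simpa using hmatch)]
      simp
    | succ j' =>
      rw [rfsnFirstMatch, if_neg (by rw [show PySem.Chars.startswith suffix n = false from by simpa using hbefore 0 (Nat.succ_pos j')]; simp)]
      have := ih j' (i + 1) (by simpa using Nat.lt_of_succ_lt_succ hj)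
        (by simpa using hmatch)
        (fun k hk => by simpa using hbefore (k + 1) (Nat.succ_lt_succ hk))
      rw [this]; congr 1; push_cast; ring

-- B's outer loop.
lemma rfsnScan_eq_none (ns : List (List Char)) :
    ∀ cs : List Char,
    (∀ p < cs.length, ∀ w ∈ ns, PySem.Chars.startswith (cs.drop p) w = false) →
    rfsnScan ns cs = "" := by
  intro cs
  induction cs with
  | nil => intro _; rfl
  | cons c rest ih =>
    intro h
    rw [rfsnScan]
    rw [rfsnFirstMatch_none (c :: rest) ns (fun w hw => h 0 (by simp) w hw) 0]
    exact ih (fun p hp w hw => h (p + 1) (by simpa using Nat.succ_lt_succ hp) w hw)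

lemma rfsnScan_eq_some (ns : List (List Char)) (j : Nat) (hj : j < ns.length) :
    ∀ (cs : List Char) (p : Nat), p < cs.length →
    (∀ q < p, ∀ w ∈ ns, PySem.Chars.startswith (cs.drop q) w = false) →
    PySem.Chars.startswith (cs.drop p) ns[j] = true →
    (∀ k (hk : k < j), PySem.Chars.startswith (cs.drop p) (ns[k]'(by omega)) = false) →
    rfsnScan ns cs = PySem.Int.toStr ((j : Int)) := by
  intro cs
  induction cs with
  | nil => intro p hp; exact absurd hp (by simp)
  | cons c rest ih =>
    intro p hp hbefore hmatch hfirst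
    cases p with
    | zero =>
      rw [rfsnScan]
      rw [rfsnFirstMatch_some (c :: rest) ns j 0 hj (by simpa using hmatch)
        (fun k hk => by simpa using hfirst k hk)]
      simp
    | succ p' =>
      rw [rfsnScan]
      rw [rfsnFirstMatch_none (c :: rest) ns (fun w hw => hbefore 0 (Nat.succ_pos p') w hw) 0]
      exact ih p' (by simpa using Nat.lt_of_succ_lt_succ hp)
        (fun q hq w hw => hbefore (q + 1) (Nat.succ_lt_succ hq) w hw)
        (by simpa using hmatch)
        (fun k hk => by simpa using hfirst k hk)

-- A prefix match of w at position q forces A's find to be ≠ -1 and ≤ q.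
lemma rfsnFind_le_of_prefix (cs : List Char) (w : String) (q : Nat)
    (h : w.toList <+: cs.drop q) : rfsnF cs w ≠ -1 ∧ rfsnF cs w ≤ (q : Int) := by
  have hin : PySem.Chars.isIn w.toList cs = true :=
    (PySem.Chars.exists_prefix_drop_iff_isIn _ _).mp ⟨q, h⟩
  have hne : rfsnF cs w ≠ -1 :=
    (PySem.Chars.find_ne_neg_one_iff _ _).mpr ((PySem.Chars.isIn_iff_infix _ _).mp hin)
  have hnn : 0 ≤ rfsnF cs w := by
    have := PySem.Chars.neg_one_le_find cs w.toList
    simp only [rfsnF] at hne ⊢; omega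
  have hspec := PySem.Chars.find_spec (s := cs) (sub := w.toList) hnn
  refine ⟨hne, ?_⟩
  by_contra hc
  rw [not_le] at hc
  have hq : q < (rfsnF cs w).toNat := by omega
  exact hspec.2 q hq h

theorem rfsn_main (input : String) (numbers : List String) :
    return_first_string_number input numbers = return_first_string_number_alt input numbers := by
  unfold return_first_string_number return_first_string_number_alt
  have hlen : PySem.Str.len input = (input.toList.length : Int) := by
    simp [PySem.Str.len_eq]
  rw [hlen, rfsnFoldA_eq input numbers 0 (input.toList.length : Int) ""]
  set cs := input.toList with hcs
  set L : Int := (cs.length : Int) with hL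
  cases hb : rfsnBest cs numbers L with
  | none =>
    have hno := (rfsnBest_none_iff cs numbers L).mp hb
    rw [rfsnScan_eq_none (numbers.map String.toList) cs ?_]
    intro p hp w hw
    obtain ⟨w0, hw0, rfl⟩ := List.mem_map.mp hw
    by_contra hc
    have hstart : PySem.Chars.startswith (cs.drop p) w0.toList = true := by
      cases hx : PySem.Chars.startswith (cs.drop p) w0.toList
      · exact absurd hx hc
      · rfl
    have hpre : w0.toList <+: cs.drop p := (PySem.Chars.startswith_iff _ _).mp hstart
    obtain ⟨hne, hle⟩ := rfsnFind_le_of_prefix cs w0 p hpre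
    exact hno w0 hw0 ⟨hne, by omega⟩
  | some pj =>
    obtain ⟨p, j⟩ := pj
    obtain ⟨hj, hF, hne, hlt, hmin⟩ := rfsnBest_some_spec cs numbers L p j hb
    have hnn : 0 ≤ p := by
      have := PySem.Chars.neg_one_le_find cs (numbers[j]).toList
      simp only [rfsnF] at hF; omega
    have hpn : p.toNat < cs.length := by omega
    have hjm : j < (numbers.map String.toList).length := by simpa using hj
    rw [rfsnScan_eq_some (numbers.map String.toList) j hjm cs p.toNat hpn ?_ ?_ ?_]
    · simp
    · -- no word matches before position p
      intro q hq w hw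
      obtain ⟨w0, hw0, rfl⟩ := List.mem_map.mp hw
      by_contra hc
      have hstart : PySem.Chars.startswith (cs.drop q) w0.toList = true := by
        cases hx : PySem.Chars.startswith (cs.drop q) w0.toList
        · exact absurd hx hc
        · rfl
      have hpre : w0.toList <+: cs.drop q := (PySem.Chars.startswith_iff _ _).mp hstart
      obtain ⟨hne0, hle0⟩ := rfsnFind_le_of_prefix cs w0 q hpre
      obtain ⟨k, hk, rfl⟩ := List.mem_iff_getElem.mp hw0
      have := hmin k hk ⟨hne0, by omega⟩
      omega
    · -- numbers[j] matches at position p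
      have hspec := PySem.Chars.find_spec (s := cs) (sub := (numbers[j]).toList)
        (by simp only [rfsnF] at hF; omega)
      have hpre := hspec.1
      rw [show (PySem.Chars.find cs (numbers[j]).toList).toNat = p.toNat by
        simp only [rfsnF] at hF; rw [hF]] at hpre
      have : (numbers.map String.toList)[j] = (numbers[j]).toList := by simp
      rw [this]
      exact (PySem.Chars.startswith_iff _ _).mpr hpre
    · -- no earlier-listed word matches at position p
      intro k hk
      have hkl : k < numbers.length := by omega
      by_contra hc
      have hstart : PySem.Chars.startswith (cs.drop p.toNat)
          ((numbers.map String.toList)[k]'(by simpa using hkl)) = true := by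
        cases hx : PySem.Chars.startswith (cs.drop p.toNat)
            ((numbers.map String.toList)[k]'(by simpa using hkl))
        · exact absurd hx hc
        · rfl
      have heq : (numbers.map String.toList)[k]'(by simpa using hkl) = (numbers[k]).toList := by
        simp
      rw [heq] at hstart
      have hpre : (numbers[k]).toList <+: cs.drop p.toNat :=
        (PySem.Chars.startswith_iff _ _).mp hstart
      obtain ⟨hne0, hle0⟩ := rfsnFind_le_of_prefix cs (numbers[k]) p.toNat hpre
      have := hmin k hkl ⟨hne0, by omega⟩
      omega

-- ===== VERDICT (by name: the statement is the Claim_ definition above) =====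
theorem return_first_string_number_spec : Claim_equal_return_first_string_number := by
  intro input numbers _
  unfold Spec_return_first_string_number
  exact rfsn_main input numbers
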